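-- pv_equiv track=rewrite | github.com/eliottcassidy2000/math | 04-computation/h21_source_sink_avoidance.py | compute_poisoning_graph
-- ===== SOURCE A (Python) =====
-- def get_vertex_3cycles(cycle_sets, v):
--     return [c for c in cycle_sets if v in c]
--
-- def compute_poisoning_graph(cycle_sets, R, AB):
--     edges = {}
--     S = set()
--     for w in R:
--         w_cycles = get_vertex_3cycles(cycle_sets, w)
--         if not w_cycles:
--             continue
--         has_ab_cycle = any(c <= ({w} | AB) for c in w_cycles)
--         if has_ab_cycle:
--             S.add(w)
--             continue
--         common_r = None
--         for c in w_cycles: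
--             r_in_c = (c - {w}) & set(R)
--             if common_r is None:
--                 common_r = r_in_c
--             else:
--                 common_r = common_r & r_in_c
--         if len(common_r) == 1:
--             target = list(common_r)[0]
--             edges[w] = target
--         else:
--             S.add(w)
--     return edges, S
-- ===== SOURCE B (Python) =====
-- def compute_poisoning_graph(cycle_sets, R, AB):
--     Rset = set(R)
--     state = {}  # w -> (has_ab_cycle_so_far, running intersection of (c - {w}) & Rset)
--     for c in cycle_sets:
--         for w in c:
--             if w in Rset:
--                 hit = c <= ({w} | AB)
--                 r_in_c = (c - {w}) & Rset
--                 if w in state: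
--                     has_ab, common = state[w]
--                     state[w] = (has_ab or hit, common & r_in_c)
--                 else:
--                     state[w] = (hit, r_in_c)
--     edges = {}
--     S = set()
--     for w in R:
--         if w not in state:
--             continue
--         has_ab, common = state[w]
--         if has_ab:
--             S.add(w)
--         elif len(common) == 1:
--             edges[w] = next(iter(common))
--         else:
--             S.add(w)
--     return edges, S
-- ===== Notes on version B (the rewrite author's own statement) =====
-- stated objective: faster
-- what changed: A rescans cycle_sets once per vertex of R (filter, an any-pass and an intersection pass over the filtered cycles); B makes a single pass over cycle_sets, accumulating per-vertex (has_ab, running intersection with set(R)) state in a dict, and then one read-out pass over R, so each cycle is visited once instead of once per incident vertex.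
import Mathlib
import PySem

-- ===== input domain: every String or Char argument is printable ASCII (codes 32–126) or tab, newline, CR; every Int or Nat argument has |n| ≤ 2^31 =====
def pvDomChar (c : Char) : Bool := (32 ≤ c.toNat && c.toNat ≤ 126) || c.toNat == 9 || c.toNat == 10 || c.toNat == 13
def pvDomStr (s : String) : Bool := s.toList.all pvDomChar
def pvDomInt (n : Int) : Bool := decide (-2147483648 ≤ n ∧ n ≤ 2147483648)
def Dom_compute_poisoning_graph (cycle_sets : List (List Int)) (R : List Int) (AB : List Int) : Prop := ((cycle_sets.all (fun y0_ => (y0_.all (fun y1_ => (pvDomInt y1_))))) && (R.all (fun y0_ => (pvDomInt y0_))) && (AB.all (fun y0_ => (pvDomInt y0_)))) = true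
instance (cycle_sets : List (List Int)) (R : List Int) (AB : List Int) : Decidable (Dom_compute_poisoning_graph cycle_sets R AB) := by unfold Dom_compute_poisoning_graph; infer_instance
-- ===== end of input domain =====

-- B replaces A's per-vertex rescans of cycle_sets (per w: filter, any-pass, intersection-pass)
-- by a single pass over cycle_sets accumulating per-vertex state in a dict, then one read-out pass over R.

-- ===== PORT A =====
def get_vertex_3cycles (cycle_sets : List (List Int)) (v : Int) : List (List Int) :=
  cycle_sets.filter (fun c => PySem.Set.contains c v)

-- the body of A's inner `for c in w_cycles` accumulation, as a named step function
def pvACommonStep (R : List Int) (w : Int) (common : Option (PySem.Set Int)) (c : List Int) : Option (PySem.Set Int) :=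
  let r_in_c := PySem.Set.inter (PySem.Set.diff c [w]) (PySem.Set.ofList R)
  match common with
  | none => some r_in_c
  | some s => some (PySem.Set.inter s r_in_c)

def pvAStep (cycle_sets : List (List Int)) (R AB : List Int)
    (acc : PySem.Dict Int Int × PySem.Set Int) (w : Int) : PySem.Dict Int Int × PySem.Set Int :=
  let w_cycles := get_vertex_3cycles cycle_sets w
  if w_cycles.isEmpty then acc
  else if w_cycles.any (fun c => PySem.Set.issubset c (PySem.Set.union [w] AB)) then
    (acc.1, PySem.Set.add acc.2 w)
  else
    let common : Option (PySem.Set Int) := w_cycles.foldl (pvACommonStep R w) none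
    -- common is never `none` here (w_cycles ≠ []), so Python's `len(None)` branch is unreachable
    let s := common.getD []
    if s.length == 1 then (acc.1.insert w (s.headD 0), acc.2)
    else (acc.1, PySem.Set.add acc.2 w)

def compute_poisoning_graph (cycle_sets : List (List Int)) (R : List Int) (AB : List Int) : (List (Int × Int)) × List Int :=
  let res := R.foldl (pvAStep cycle_sets R AB) (PySem.Dict.empty, PySem.Set.empty)
  (res.1.items, res.2)

-- ===== PORT B =====
def pvBInner (AB : List Int) (Rset : PySem.Set Int) (c : List Int)
    (st : PySem.Dict Int (Bool × PySem.Set Int)) (w : Int) : PySem.Dict Int (Bool × PySem.Set Int) :=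
  if PySem.Set.contains Rset w then
    let hit := PySem.Set.issubset c (PySem.Set.union [w] AB)
    let r_in_c := PySem.Set.inter (PySem.Set.diff c [w]) Rset
    match st.get? w with
    | some p => st.insert w (p.1 || hit, PySem.Set.inter p.2 r_in_c)
    | none => st.insert w (hit, r_in_c)
  else st

def pvBFinal (state : PySem.Dict Int (Bool × PySem.Set Int))
    (acc : PySem.Dict Int Int × PySem.Set Int) (w : Int) : PySem.Dict Int Int × PySem.Set Int :=
  match state.get? w with
  | none => acc
  | some p =>
    if p.1 then (acc.1, PySem.Set.add acc.2 w)
    else if p.2.length == 1 then (acc.1.insert w (p.2.headD 0), acc.2)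
    else (acc.1, PySem.Set.add acc.2 w)

def compute_poisoning_graph_alt (cycle_sets : List (List Int)) (R : List Int) (AB : List Int) : (List (Int × Int)) × List Int :=
  let Rset := PySem.Set.ofList R
  let state := cycle_sets.foldl (fun st c => c.foldl (pvBInner AB Rset c) st) PySem.Dict.empty
  let res := R.foldl (pvBFinal state) (PySem.Dict.empty, PySem.Set.empty)
  (res.1.items, res.2)

-- ===== PRECONDITION & SPEC =====
def Spec_compute_poisoning_graph (cycle_sets : List (List Int)) (R : List Int) (AB : List Int) (out : (List (Int × Int)) × List Int) : Prop := out = compute_poisoning_graph_alt cycle_sets R AB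
instance (cycle_sets : List (List Int)) (R : List Int) (AB : List Int) (out : (List (Int × Int)) × List Int) : Decidable (Spec_compute_poisoning_graph cycle_sets R AB out) := by unfold Spec_compute_poisoning_graph; infer_instance

-- ===== CLAIM (what is proved, stated in full; the proofs are below) =====
def Claim_equal_compute_poisoning_graph : Prop := ∀ (cycle_sets : List (List Int)) (R : List Int) (AB : List Int), Dom_compute_poisoning_graph cycle_sets R AB → Spec_compute_poisoning_graph cycle_sets R AB (compute_poisoning_graph cycle_sets R AB)

-- ===== LEMMAS AND PROOFS =====

-- the per-(vertex, cycle) state update B performs, as a function of the previous optional state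
def pvUpd (AB : List Int) (Rset : PySem.Set Int) (c : List Int) (w : Int) :
    Option (Bool × PySem.Set Int) → Bool × PySem.Set Int
  | some p => (p.1 || PySem.Set.issubset c (PySem.Set.union [w] AB),
               PySem.Set.inter p.2 (PySem.Set.inter (PySem.Set.diff c [w]) Rset))
  | none => (PySem.Set.issubset c (PySem.Set.union [w] AB),
             PySem.Set.inter (PySem.Set.diff c [w]) Rset)

theorem pvInter_inter_self (s t : List Int) :
    PySem.Set.inter (PySem.Set.inter s t) t = PySem.Set.inter s t := by
  simp [PySem.Set.inter, List.filter_filter]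

theorem pvInter_self (s : List Int) : PySem.Set.inter s s = s := by
  simp only [PySem.Set.inter]
  exact List.filter_eq_self.mpr (fun a ha => by simpa using ha)

theorem pvUpd_idem (AB : List Int) (Rset : PySem.Set Int) (c : List Int) (w : Int)
    (o : Option (Bool × PySem.Set Int)) :
    pvUpd AB Rset c w (some (pvUpd AB Rset c w o)) = pvUpd AB Rset c w o := by
  cases o <;> simp [pvUpd, pvInter_inter_self, pvInter_self]

theorem pvBInner_eq (AB : List Int) (Rset : PySem.Set Int) (c : List Int)
    (st : PySem.Dict Int (Bool × PySem.Set Int)) (w : Int) :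
    pvBInner AB Rset c st w =
      if PySem.Set.contains Rset w then st.insert w (pvUpd AB Rset c w (st.get? w)) else st := by
  unfold pvBInner
  cases h : st.get? w <;> simp [pvUpd]

theorem pvInnerFold_get? (AB : List Int) (Rset : PySem.Set Int) (c : List Int) (w : Int) :
    ∀ (c' : List Int) (st : PySem.Dict Int (Bool × PySem.Set Int)),
      (c'.foldl (pvBInner AB Rset c) st).get? w =
        if PySem.Set.contains Rset w = true ∧ w ∈ c' then some (pvUpd AB Rset c w (st.get? w))
        else st.get? w := by
  intro c'
  induction c' with
  | nil => intro st; simp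
  | cons a c' ih =>
    intro st
    rw [List.foldl_cons, ih, pvBInner_eq]
    by_cases hR : PySem.Set.contains Rset w = true
    · have hwR : w ∈ Rset := (PySem.Set.contains_iff _ _).mp hR
      by_cases haw : w = a
      · subst haw
        by_cases hc' : w ∈ c' <;>
          simp [hwR, hc', PySem.Dict.get?_insert_self, pvUpd_idem]
      · by_cases hRa : a ∈ Rset <;>
          by_cases hc' : w ∈ c' <;>
            simp [hRa, hc', haw, PySem.Dict.get?_insert, hwR]
    · have hwR : w ∉ Rset := fun h => hR ((PySem.Set.contains_iff _ _).mpr h)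
      by_cases hRa : a ∈ Rset
      · have haw : w ≠ a := fun h => hwR (h ▸ hRa)
        simp [hRa, hwR, PySem.Dict.get?_insert, haw]
      · simp [hRa, hwR]

theorem pvOuterFold_get? (AB : List Int) (Rset : PySem.Set Int) (w : Int)
    (hR : PySem.Set.contains Rset w = true) :
    ∀ (cs : List (List Int)) (st : PySem.Dict Int (Bool × PySem.Set Int)),
      (cs.foldl (fun st c => c.foldl (pvBInner AB Rset c) st) st).get? w =
        (cs.filter (fun c => PySem.Set.contains c w)).foldl
          (fun o c => some (pvUpd AB Rset c w o)) (st.get? w) := by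
  have hwR : w ∈ Rset := (PySem.Set.contains_iff _ _).mp hR
  intro cs
  induction cs with
  | nil => intro st; simp
  | cons c cs ih =>
    intro st
    rw [List.foldl_cons, ih, pvInnerFold_get?]
    by_cases hc : w ∈ c <;> simp [hwR, hc]

-- folding B's update over the incident cycles, seeded with a present state,
-- is (accumulated any, accumulated intersection)
theorem pvOptFold_some (AB : List Int) (Rset : PySem.Set Int) (w : Int) :
    ∀ (hs : List (List Int)) (b : Bool) (s : PySem.Set Int),
      hs.foldl (fun o c => some (pvUpd AB Rset c w o)) (some (b, s)) =
        some (b || hs.any (fun c => PySem.Set.issubset c (PySem.Set.union [w] AB)),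
              hs.foldl (fun s c => PySem.Set.inter s (PySem.Set.inter (PySem.Set.diff c [w]) Rset)) s) := by
  intro hs
  induction hs with
  | nil => intro b s; simp
  | cons c hs ih =>
    intro b s
    rw [List.foldl_cons]
    show hs.foldl _ (some (pvUpd AB Rset c w (some (b, s)))) = _
    rw [show pvUpd AB Rset c w (some (b, s)) =
        (b || PySem.Set.issubset c (PySem.Set.union [w] AB),
         PySem.Set.inter s (PySem.Set.inter (PySem.Set.diff c [w]) Rset)) from rfl, ih]
    simp [Bool.or_assoc]

-- A's None-seeded intersection loop, once the list is nonempty, is a plain fold from the head's value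
theorem pvAFold_some (R : List Int) (w : Int) :
    ∀ (t : List (List Int)) (s : PySem.Set Int),
      t.foldl (pvACommonStep R w) (some s) =
        some (t.foldl (fun s c => PySem.Set.inter s (PySem.Set.inter (PySem.Set.diff c [w]) (PySem.Set.ofList R))) s) := by
  intro t
  induction t with
  | nil => intro s; simp
  | cons c t ih =>
    intro s
    rw [List.foldl_cons, show pvACommonStep R w (some s) c =
      some (PySem.Set.inter s (PySem.Set.inter (PySem.Set.diff c [w]) (PySem.Set.ofList R))) from rfl,
      ih, List.foldl_cons]

theorem pvStep_agree (cycle_sets : List (List Int)) (R AB : List Int) (w : Int) (hw : w ∈ R)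
    (acc : PySem.Dict Int Int × PySem.Set Int) :
    pvAStep cycle_sets R AB acc w =
      pvBFinal (cycle_sets.foldl (fun st c => c.foldl (pvBInner AB (PySem.Set.ofList R) c) st)
        PySem.Dict.empty) acc w := by
  have hR : PySem.Set.contains (PySem.Set.ofList R) w = true :=
    (PySem.Set.contains_iff _ w).mpr ((PySem.Set.mem_ofList R w).mpr hw)
  have hstate := pvOuterFold_get? AB (PySem.Set.ofList R) w hR cycle_sets PySem.Dict.empty
  rw [PySem.Dict.get?_empty] at hstate
  unfold pvBFinal
  rw [hstate]
  cases hhs : cycle_sets.filter (fun c => PySem.Set.contains c w) with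
  | nil =>
    have hA : get_vertex_3cycles cycle_sets w = [] := hhs
    simp [pvAStep, hA]
  | cons c t =>
    rw [List.foldl_cons,
      show pvUpd AB (PySem.Set.ofList R) c w none =
        (PySem.Set.issubset c (PySem.Set.union [w] AB),
         PySem.Set.inter (PySem.Set.diff c [w]) (PySem.Set.ofList R)) from rfl,
      pvOptFold_some]
    have hA : get_vertex_3cycles cycle_sets w = c :: t := hhs
    simp only [pvAStep, hA, List.isEmpty_cons, Bool.false_eq_true, if_false, List.any_cons,
      List.foldl_cons]
    rw [show pvACommonStep R w none c =
        some (PySem.Set.inter (PySem.Set.diff c [w]) (PySem.Set.ofList R)) from rfl,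
      pvAFold_some]
    simp only [Option.getD_some]

-- ===== VERDICT (by name: the statement is the Claim_ definition above) =====
theorem compute_poisoning_graph_spec : Claim_equal_compute_poisoning_graph := by
  intro cycle_sets R AB _
  unfold Spec_compute_poisoning_graph compute_poisoning_graph compute_poisoning_graph_alt
  rw [PySem.List.foldl_congr_mem R (pvAStep cycle_sets R AB)
    (pvBFinal (cycle_sets.foldl (fun st c => c.foldl (pvBInner AB (PySem.Set.ofList R) c) st)
      PySem.Dict.empty)) (PySem.Dict.empty, PySem.Set.empty)
    (fun acc x hx => pvStep_agree cycle_sets R AB x hx acc)]
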